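-- pv_equiv track=rewrite | github.com/CaTwoPlus/alga_I | bfs_short_reach_src.py | bfs
-- ===== SOURCE A (Python) =====
-- from collections import deque
--
-- def bfs(n, m, elek, s):
--     # 2d-s lista; minden csucsnak kulon listat hozunk letre, amely tartalmazza az adott csucshoz
--     # kapcsolodo szomszedos csucsokat
--     szomszedok = [[] for _ in range(n + 1)]
--     # vegig megyunk az elek listajan, ahol minden u,v par egy elt jelol
--     for u, v in elek:
--         # v-t hozzaadjuk az u szomszedaihoz
--         szomszedok[u].append(v)
--         # u-t hozzaadjuk v szomszedaihoz, mert a graf iranyitatlan, az el ketiranyu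
--         szomszedok[v].append(u)
--
--     # kezdetben minden csucs elerhetetlen, tehat ertekuk = -1
--     tavolsagok = [-1] * (n + 1)
--     # kezdőcsúcs távolsága 0, hiszen unmagatol 0-ra van
--     tavolsagok[s] = 0
--
--     # BFS-hez letrehozunk egy deque-t, egy lista-szeru kontenert, amivel gyorsan
--     # lehet elemeket hozzaadni, torolni a lista mindket vegerol. Belehelyezzuk a kezdocsucsot.
--     sor = deque([s])
--
--     # BFS algoritmus
--     # addig fog futni, amig a sor ures nem lesz
--     while sor:
--         # kivesszuk a sor elejet, ami a jelenlegi csucs lesz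
--         jelenlegi = sor.popleft()
--
--         # vegigmegyunk az csucs osszes szomszedjan
--         for szomszed in szomszedok[jelenlegi]:
--             # ha a szomszed csucsot meg nem latogattuk meg
--             if tavolsagok[szomszed] == -1:
--                 # akkor a szomszed tavolsaga a jelenlegi csucs tavolsagahoz kepest 6-al lesz tobb
--                 tavolsagok[szomszed] = tavolsagok[jelenlegi] + 6
--                 # hozzaadjuk a szomszedot a sorhoz, hogy a sajat szomszedait is feldolgozhassuk
--                 sor.append(szomszed)
--
--     # letrehozunk egy ures listat, amiben osszegyujtuk a kezdocsucstol valo tavolsagokat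
--     eredmeny = []
--     # ha az aktualis index (i) nem a kezdocsucs (s), akkor a tavolsagat (tavolsagok[i]) hozzaadjuk
--     # az eredmeny listahoz
--     for i in range(1, n + 1):
--         if i != s:
--             eredmeny.append(tavolsagok[i])
--
--     # visszaterunk a kezdocsucsbol a tobbi csucsba vezeto legrovidebb tavolsagokkal
--     return eredmeny
-- ===== SOURCE B (Python) =====
-- def bfs(n, m, elek, s):
--     # Bellman-Ford-style level-synchronous relaxation over the raw edge list:
--     # no adjacency lists, no queue.  Round d discovers exactly the BFS level at
--     # distance d, because an undirected edge can only extend a shortest path by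
--     # one level at a time.
--     dist = [-1] * (n + 1)
--     dist[s] = 0
--     d = 0
--     changed = True
--     while changed:
--         d += 6
--         changed = False
--         for u, v in elek:
--             if dist[u] == d - 6 and dist[v] == -1:
--                 dist[v] = d
--                 changed = True
--             elif dist[v] == d - 6 and dist[u] == -1:
--                 dist[u] = d
--                 changed = True
--     out = []
--     for i in range(1, n + 1):
--         if i != s:
--             out.append(dist[i])
--     return out
-- ===== Notes on version B (the rewrite author's own statement) =====
-- stated objective: alternative
-- what changed: Replaces adjacency-list BFS with a queue by Bellman-Ford-style level-synchronous relaxation: no adjacency lists and no queue/frontier are built at all; instead the raw edge list is swept once per distance level, setting dist=d on every unvisited endpoint whose other endpoint has dist d-6, until a sweep changes nothing.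
import Mathlib
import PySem

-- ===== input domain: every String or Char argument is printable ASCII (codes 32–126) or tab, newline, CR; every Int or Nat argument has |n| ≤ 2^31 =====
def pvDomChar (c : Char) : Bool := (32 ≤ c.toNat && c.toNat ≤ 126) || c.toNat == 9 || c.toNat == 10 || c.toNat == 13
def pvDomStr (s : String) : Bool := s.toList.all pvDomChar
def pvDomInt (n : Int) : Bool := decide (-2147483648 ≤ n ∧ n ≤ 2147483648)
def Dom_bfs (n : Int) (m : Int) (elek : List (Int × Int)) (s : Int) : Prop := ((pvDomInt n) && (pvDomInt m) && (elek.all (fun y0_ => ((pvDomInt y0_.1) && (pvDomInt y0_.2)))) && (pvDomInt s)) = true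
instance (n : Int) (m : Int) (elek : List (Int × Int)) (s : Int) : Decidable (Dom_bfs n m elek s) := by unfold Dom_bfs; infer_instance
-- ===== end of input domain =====

-- B replaces A's adjacency-list + queue BFS by Bellman-Ford-style level-synchronous
-- sweeps over the raw edge list (no adjacency structure, no queue); same return value.
-- Objective: alternative algorithm (no speed claim).

-- ===== PORT A =====
-- szomszedok[u].append(v) (an in-place append is a functional set)
def adjIns (sz : List (List Int)) (u v : Int) : List (List Int) :=
  PySem.List.pySetD sz u ((PySem.List.pyGetD sz u []) ++ [v])

-- the 'for u, v in elek' loop building the adjacency lists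
def buildAdj (len : Nat) (elek : List (Int × Int)) : List (List Int) :=
  elek.foldl (fun sz uv => adjIns (adjIns sz uv.1 uv.2) uv.2 uv.1) (List.replicate len [])

-- A's inner 'for szomszed in szomszedok[jelenlegi]' loop: relax each neighbour in
-- order, returning (new distances, newly discovered nodes to enqueue)
def relaxNbrs (j : Int) (nbrs : List Int) (tav : List Int) : List Int × List Int :=
  match nbrs with
  | [] => (tav, [])
  | v :: vs =>
    if PySem.List.pyGetD tav v 0 = -1 then
      let p := relaxNbrs j vs (PySem.List.pySetD tav v (PySem.List.pyGetD tav j 0 + 6))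
      (p.1, v :: p.2)
    else relaxNbrs j vs tav

def relaxNode (szom : List (List Int)) (tav : List Int) (j : Int) : List Int × List Int :=
  relaxNbrs j (PySem.List.pyGetD szom j []) tav

-- A's while-loop over the deque: pop the front node, relax its neighbours, append the
-- newly discovered nodes at the back.  Fuel only guards termination (each node is
-- enqueued at most once, so the fuel given at the call site always suffices).
def bfsQueue (szom : List (List Int)) : Nat → List Int → List Int → List Int
  | _, [], tav => tav
  | 0, _ :: _, tav => tav
  | f + 1, j :: rest, tav =>
    let p := relaxNode szom tav j
    bfsQueue szom f (rest ++ p.2) p.1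

def bfs (n : Int) (m : Int) (elek : List (Int × Int)) (s : Int) : List Int :=
  let szom := buildAdj (n + 1).toNat elek
  let tav0 := PySem.List.pySetD (List.replicate (n + 1).toNat (-1)) s 0
  let tav := bfsQueue szom ((n + 1).toNat + 1) [s] tav0
  (PySem.List.pyRange 1 (n + 1) 1).foldl
    (fun acc i => if i ≠ s then acc ++ [PySem.List.pyGetD tav i 0] else acc) []

-- ===== PORT B =====
-- B's 'for u, v in elek' body: one edge-relaxation at level d (if/elif as in Source B)
def edgeStep (d : Int) (p : List Int × Bool) (uv : Int × Int) : List Int × Bool :=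
  if PySem.List.pyGetD p.1 uv.1 0 = d - 6 ∧ PySem.List.pyGetD p.1 uv.2 0 = -1 then
    (PySem.List.pySetD p.1 uv.2 d, true)
  else if PySem.List.pyGetD p.1 uv.2 0 = d - 6 ∧ PySem.List.pyGetD p.1 uv.1 0 = -1 then
    (PySem.List.pySetD p.1 uv.1 d, true)
  else p

-- one full sweep of the edge list, with the 'changed' flag
def edgePass (elek : List (Int × Int)) (d : Int) (tav : List Int) : List Int × Bool :=
  elek.foldl (edgeStep d) (tav, false)

-- B's 'while changed' loop: d += 6, sweep, repeat while something changed.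
-- Fuel only guards termination (each changed sweep unvisits at least one node,
-- so the fuel given at the call site always suffices).
def bfsRounds (elek : List (Int × Int)) : Nat → Int → List Int → List Int
  | 0, _, tav => tav
  | f + 1, d, tav =>
    let p := edgePass elek (d + 6) tav
    if p.2 then bfsRounds elek f (d + 6) p.1 else p.1

def bfs_alt (n : Int) (m : Int) (elek : List (Int × Int)) (s : Int) : List Int :=
  let tav0 := PySem.List.pySetD (List.replicate (n + 1).toNat (-1)) s 0
  let tav := bfsRounds elek ((n + 1).toNat + 1) 0 tav0
  (PySem.List.pyRange 1 (n + 1) 1).foldl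
    (fun acc i => if i ≠ s then acc ++ [PySem.List.pyGetD tav i 0] else acc) []

-- ===== PRECONDITION & SPEC =====
-- Pre_ excludes exactly the inputs on which A raises IndexError: an s or an edge
-- endpoint outside the Python index range [-(n+1), n] of the length-(n+1) lists.
def Pre_bfs (n : Int) (m : Int) (elek : List (Int × Int)) (s : Int) : Prop :=
  (∀ p ∈ elek, (-(n + 1) ≤ p.1 ∧ p.1 ≤ n) ∧ (-(n + 1) ≤ p.2 ∧ p.2 ≤ n)) ∧
  (-(n + 1) ≤ s ∧ s ≤ n)
instance (n : Int) (m : Int) (elek : List (Int × Int)) (s : Int) : Decidable (Pre_bfs n m elek s) := by unfold Pre_bfs; infer_instance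
def pvWitness_bfs : Int × Int × (List (Int × Int)) × Int := (4, 2, [(1, 2), (2, 3)], 1)

def Spec_bfs (n : Int) (m : Int) (elek : List (Int × Int)) (s : Int) (out : List Int) : Prop := out = bfs_alt n m elek s
instance (n : Int) (m : Int) (elek : List (Int × Int)) (s : Int) (out : List Int) : Decidable (Spec_bfs n m elek s out) := by unfold Spec_bfs; infer_instance

-- ===== CLAIM (what is proved, stated in full; the proofs are below) =====
def Claim_equal_bfs : Prop := ∀ (n : Int) (m : Int) (elek : List (Int × Int)) (s : Int), Dom_bfs n m elek s → Pre_bfs n m elek s → Spec_bfs n m elek s (bfs n m elek s)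

-- ===== LEMMAS AND PROOFS =====

-- proof-only intermediate: layer-at-a-time BFS, bridging A's queue and B's sweeps
def relaxLayer (szom : List (List Int)) : List Int → List Int → List Int × List Int
  | [], tav => (tav, [])
  | j :: rest, tav =>
    let p := relaxNode szom tav j
    let q := relaxLayer szom rest p.1
    (q.1, p.2 ++ q.2)

def bfsLayers (szom : List (List Int)) : Nat → List Int → List Int → List Int
  | _, [], tav => tav
  | 0, _ :: _, tav => tav
  | g + 1, j :: rest, tav =>
    let p := relaxLayer szom (j :: rest) tav
    bfsLayers szom g p.2 p.1

-- invariant: every stored distance is -1 (unvisited) or nonnegative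
def InvT (tav : List Int) : Prop := ∀ x ∈ tav, x = -1 ∨ 0 ≤ x

theorem pyIdx?_lt_of_some {len : Nat} {i : Int} {k : Nat} (h : PySem.List.pyIdx? len i = some k) : k < len := by
  unfold PySem.List.pyIdx? at h
  split_ifs at h <;> simp_all <;> omega

theorem pyGetD_cases (xs : List Int) (i : Int) (d : Int) :
    PySem.List.pyGetD xs i d = d ∨ PySem.List.pyGetD xs i d ∈ xs := by
  cases h : PySem.List.pyIdx? xs.length i with
  | none => left; simp [PySem.List.pyGetD, PySem.List.pyGet?, h]
  | some k =>
    have hk := pyIdx?_lt_of_some h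
    right
    simp only [PySem.List.pyGetD, PySem.List.pyGet?, h, Option.bind_some,
      List.getElem?_eq_getElem hk, Option.getD_some]
    exact List.getElem_mem hk

theorem mem_pySetD {xs : List Int} {i : Int} {v x : Int} (h : x ∈ PySem.List.pySetD xs i v) :
    x ∈ xs ∨ x = v := by
  simp only [PySem.List.pySetD, PySem.List.pySet?] at h
  cases hk : PySem.List.pyIdx? xs.length i with
  | none => simp [hk] at h; exact Or.inl h
  | some k => simp [hk] at h; exact List.mem_or_eq_of_mem_set h

-- a hit (tav[v] == -1 with default 0) means the resolved index holds -1
theorem hit_resolve {tav : List Int} {v : Int} (h : PySem.List.pyGetD tav v 0 = -1) :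
    ∃ k, PySem.List.pyIdx? tav.length v = some k ∧ ∃ hlt : k < tav.length, tav[k] = -1 := by
  simp only [PySem.List.pyGetD, PySem.List.pyGet?] at h
  cases hk : PySem.List.pyIdx? tav.length v with
  | none => rw [hk] at h; simp at h
  | some k =>
    rw [hk] at h
    have hlt := pyIdx?_lt_of_some hk
    refine ⟨k, rfl, hlt, ?_⟩
    simpa [List.getElem?_eq_getElem hlt] using h

-- one relaxation step: the invariant is kept and every newly discovered node turns
-- exactly one -1 entry into a nonnegative one
theorem relaxNbrs_invariant (j : Int) (nbrs : List Int) :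
    ∀ tav : List Int, InvT tav →
      InvT (relaxNbrs j nbrs tav).1 ∧
      (relaxNbrs j nbrs tav).1.count (-1) + (relaxNbrs j nbrs tav).2.length = tav.count (-1) := by
  induction nbrs with
  | nil => intro tav hInv; exact ⟨hInv, by simp [relaxNbrs]⟩
  | cons v vs ih =>
    intro tav hInv
    by_cases hv : PySem.List.pyGetD tav v 0 = -1
    · simp only [relaxNbrs, hv, if_pos]
      have hw : (0:Int) ≤ PySem.List.pyGetD tav j 0 + 6 := by
        rcases pyGetD_cases tav j 0 with h0 | hmem
        · omega
        · rcases hInv _ hmem with h1 | h2 <;> omega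
      generalize hwdef : PySem.List.pyGetD tav j 0 + 6 = w at *
      have hInv' : InvT (PySem.List.pySetD tav v w) := by
        intro x hx
        rcases mem_pySetD hx with hx' | hx'
        · exact hInv _ hx'
        · right; omega
      obtain ⟨k, hk, hklt, hkval⟩ := hit_resolve hv
      have hcount : (PySem.List.pySetD tav v w).count (-1) + 1 = tav.count (-1) := by
        simp only [PySem.List.pySetD, PySem.List.pySet?, hk, Option.map_some, Option.getD_some]
        rw [List.count_set hklt]
        have hw' : ¬ (w = -1) := by omega
        have h1 : 1 ≤ tav.count (-1) := by
          have : (-1:Int) ∈ tav := hkval ▸ List.getElem_mem hklt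
          exact List.one_le_count_iff.mpr this
        simp only [hkval, hw', beq_self_eq_true, beq_iff_eq, if_true, if_false]
        omega
      have hrec := ih (PySem.List.pySetD tav v w) hInv'
      refine ⟨hrec.1, ?_⟩
      simp only [List.length_cons]
      omega
    · have hrec := ih tav hInv
      simp only [relaxNbrs, hv, if_false]
      exact hrec

theorem relaxNode_invariant (szom : List (List Int)) (tav : List Int) (j : Int) (hInv : InvT tav) :
    InvT (relaxNode szom tav j).1 ∧
    (relaxNode szom tav j).1.count (-1) + (relaxNode szom tav j).2.length = tav.count (-1) :=
  relaxNbrs_invariant j _ tav hInv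

theorem relaxLayer_invariant (szom : List (List Int)) (layer : List Int) :
    ∀ tav : List Int, InvT tav →
      InvT (relaxLayer szom layer tav).1 ∧
      (relaxLayer szom layer tav).1.count (-1) + (relaxLayer szom layer tav).2.length = tav.count (-1) := by
  induction layer with
  | nil => intro tav hInv; exact ⟨hInv, by simp [relaxLayer]⟩
  | cons j rest ih =>
    intro tav hInv
    have h1 := relaxNode_invariant szom tav j hInv
    have h2 := ih (relaxNode szom tav j).1 h1.1
    simp only [relaxLayer]
    refine ⟨h2.1, ?_⟩
    simp only [List.length_append]
    omega

-- processing a prefix q of the queue node-by-node equals one relaxLayer pass over q,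
-- with the discovered nodes appended after the untouched part of the queue
theorem bfsQueue_layer (szom : List (List Int)) (q : List Int) :
    ∀ (pending tav : List Int) (f : Nat), InvT tav → q.length ≤ f →
      bfsQueue szom f (q ++ pending) tav =
        bfsQueue szom (f - q.length) (pending ++ (relaxLayer szom q tav).2) (relaxLayer szom q tav).1 := by
  induction q with
  | nil => intro pending tav f _ _; simp [relaxLayer]
  | cons j q' ih =>
    intro pending tav f hInv hf
    obtain ⟨f', rfl⟩ : ∃ f', f = f' + 1 := by
      cases f with
      | zero => simp at hf
      | succ f' => exact ⟨f', rfl⟩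
    have hInv' := (relaxNode_invariant szom tav j hInv).1
    have hf' : q'.length ≤ f' := by simpa using hf
    simp only [List.cons_append, bfsQueue]
    rw [show (q' ++ pending) ++ (relaxNode szom tav j).2
        = q' ++ (pending ++ (relaxNode szom tav j).2) by simp]
    rw [ih (pending ++ (relaxNode szom tav j).2) (relaxNode szom tav j).1 f' hInv' hf']
    simp only [relaxLayer, List.length_cons]
    congr 1
    · omega
    · simp

-- the node-at-a-time queue loop computes the same distances as the layer-at-a-time loop
theorem bfsQueue_eq_bfsLayers (szom : List (List Int)) (g : Nat) :
    ∀ (q tav : List Int) (f : Nat), InvT tav →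
      q.length + tav.count (-1) ≤ f → q.length + tav.count (-1) ≤ g →
      bfsQueue szom f q tav = bfsLayers szom g q tav := by
  induction g with
  | zero =>
    intro q tav f _ _ hg
    have : q = [] := by
      cases q with
      | nil => rfl
      | cons a as => exfalso; simp only [List.length_cons] at hg; omega
    subst this
    cases f <;> simp [bfsQueue, bfsLayers]
  | succ g' ih =>
    intro q tav f hInv hf hg
    cases q with
    | nil => cases f <;> simp [bfsQueue, bfsLayers]
    | cons j rest =>
      have hlay := relaxLayer_invariant szom (j :: rest) tav hInv
      have hql : (j :: rest).length ≤ f := by omega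
      have h1 := bfsQueue_layer szom (j :: rest) [] tav f hInv hql
      simp only [List.append_nil, List.nil_append] at h1
      rw [h1]
      simp only [bfsLayers]
      apply ih
      · exact hlay.1
      · have hc := hlay.2
        have : tav.count (-1) ≤ f - (j :: rest).length := by
          simp only [List.length_cons] at hf ⊢; omega
        omega
      · have hc := hlay.2
        simp only [List.length_cons] at hg; omega

theorem InvT_init (len : Nat) (s : Int) :
    InvT (PySem.List.pySetD (List.replicate len (-1)) s 0) := by
  intro x hx
  rcases mem_pySetD hx with hx' | hx'
  · left; exact List.eq_of_mem_replicate hx'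
  · right; omega

-- ===== bridging raw Python indices to resolved Nat indices =====

theorem getD_bridge {α : Type} {t : List α} {u : Int} {j : Nat} (c : α)
    (h : PySem.List.pyIdx? t.length u = some j) :
    PySem.List.pyGetD t u c = t.getD j c := by
  simp [PySem.List.pyGetD, PySem.List.pyGet?, h, List.getD_eq_getElem?_getD]

theorem setD_bridge {α : Type} {t : List α} {u : Int} {j : Nat} (x : α)
    (h : PySem.List.pyIdx? t.length u = some j) :
    PySem.List.pySetD t u x = t.set j x := by
  simp [PySem.List.pySetD, PySem.List.pySet?, h]

theorem resolve_of_bounds {n u : Int} (h1 : -(n + 1) ≤ u) (h2 : u ≤ n) :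
    ∃ j, PySem.List.pyIdx? (n + 1).toNat u = some j := by
  simp only [PySem.List.pyIdx?]
  split_ifs with hpos hlt hneg
  · exact ⟨u.toNat, rfl⟩
  · exfalso; omega
  · exact ⟨(n + 1).toNat - (-u).toNat, rfl⟩
  · exfalso; omega

-- the marking condition of one sweep at level d, w.r.t. the round-start array tav
def Marks (elek : List (Int × Int)) (N : Nat) (tav : List Int) (d : Int) (k : Nat) : Prop :=
  ∃ uv ∈ elek,
    ((∃ j, PySem.List.pyIdx? N uv.1 = some j ∧ tav.getD j 0 = d - 6) ∧
      PySem.List.pyIdx? N uv.2 = some k) ∨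
    ((∃ j, PySem.List.pyIdx? N uv.2 = some j ∧ tav.getD j 0 = d - 6) ∧
      PySem.List.pyIdx? N uv.1 = some k)

theorem getD_set_self {t : List Int} {k : Nat} (hk : k < t.length) (x : Int) :
    (t.set k x).getD k 0 = x := by
  rw [List.getD_eq_getElem _ _ (by simpa using hk)]
  simp

theorem getD_set_ne {t : List Int} {j k : Nat} (hjk : j ≠ k) (x : Int) :
    (t.set j x).getD k 0 = t.getD k 0 := by
  by_cases hk : k < t.length
  · rw [List.getD_eq_getElem _ _ (by simpa using hk), List.getD_eq_getElem _ _ hk,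
      List.getElem_set_ne hjk]
  · rw [List.getD_eq_default _ _ (by simp; omega), List.getD_eq_default _ _ (by omega)]

theorem Marks_cons (uv : Int × Int) (es : List (Int × Int)) (N : Nat) (tav : List Int) (d : Int) (k : Nat) :
    Marks (uv :: es) N tav d k ↔
      (((∃ j, PySem.List.pyIdx? N uv.1 = some j ∧ tav.getD j 0 = d - 6) ∧
          PySem.List.pyIdx? N uv.2 = some k) ∨
       ((∃ j, PySem.List.pyIdx? N uv.2 = some j ∧ tav.getD j 0 = d - 6) ∧
          PySem.List.pyIdx? N uv.1 = some k) ∨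
       Marks es N tav d k) := by
  unfold Marks
  constructor
  · rintro ⟨x, hx, h | h⟩
    · rcases List.mem_cons.mp hx with rfl | hx'
      · exact Or.inl h
      · exact Or.inr (Or.inr ⟨x, hx', Or.inl h⟩)
    · rcases List.mem_cons.mp hx with rfl | hx'
      · exact Or.inr (Or.inl h)
      · exact Or.inr (Or.inr ⟨x, hx', Or.inr h⟩)
  · rintro (h | h | ⟨x, hx, h⟩)
    · exact ⟨uv, by simp, Or.inl h⟩
    · exact ⟨uv, by simp, Or.inr h⟩
    · exact ⟨x, by simp [hx], h⟩

theorem edgePass_go (N : Nat) (tav : List Int) (d : Int) (hd : 6 ≤ d) :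
    ∀ (es : List (Int × Int)) (t : List Int) (b : Bool),
      t.length = N →
      (∀ uv ∈ es, (∃ j, PySem.List.pyIdx? N uv.1 = some j) ∧ (∃ j, PySem.List.pyIdx? N uv.2 = some j)) →
      (∀ k, k < N → t.getD k 0 = tav.getD k 0 ∨ (tav.getD k 0 = -1 ∧ t.getD k 0 = d)) →
      (es.foldl (edgeStep d) (t, b)).1.length = N ∧
      (∀ k, k < N →
        (Marks es N tav d k ∧ t.getD k 0 = -1 → (es.foldl (edgeStep d) (t, b)).1.getD k 0 = d) ∧
        (¬(Marks es N tav d k ∧ t.getD k 0 = -1) → (es.foldl (edgeStep d) (t, b)).1.getD k 0 = t.getD k 0)) ∧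
      ((es.foldl (edgeStep d) (t, b)).2 = true ↔
        b = true ∨ ∃ k, k < N ∧ Marks es N tav d k ∧ t.getD k 0 = -1) := by
  intro es
  induction es with
  | nil =>
    intro t b hlen _ _
    refine ⟨hlen, ?_, ?_⟩
    · intro k _
      refine ⟨?_, fun _ => rfl⟩
      rintro ⟨⟨x, hx, _⟩, _⟩
      simp at hx
    · constructor
      · exact fun h => Or.inl h
      · rintro (h | ⟨k, _, ⟨x, hx, _⟩, _⟩)
        · exact h
        · simp at hx
  | cons uv es ih =>
    intro t b hlen hE compat
    obtain ⟨⟨ju, hju⟩, ⟨jv, hjv⟩⟩ := hE uv (by simp)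
    have hjult := pyIdx?_lt_of_some hju
    have hjvlt := pyIdx?_lt_of_some hjv
    have e1 : PySem.List.pyGetD t uv.1 0 = t.getD ju 0 := getD_bridge 0 (by rw [hlen]; exact hju)
    have e2 : PySem.List.pyGetD t uv.2 0 = t.getD jv 0 := getD_bridge 0 (by rw [hlen]; exact hjv)
    have hE' : ∀ x ∈ es, (∃ j, PySem.List.pyIdx? N x.1 = some j) ∧ (∃ j, PySem.List.pyIdx? N x.2 = some j) :=
      fun x hx => hE x (by simp [hx])
    have hstable : ∀ j, j < N → (t.getD j 0 = d - 6 ↔ tav.getD j 0 = d - 6) := by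
      intro j hj
      rcases compat j hj with h | ⟨h1, h2⟩
      · rw [h]
      · rw [h1, h2]
        constructor <;> intro h <;> omega
    by_cases hc1 : t.getD ju 0 = d - 6 ∧ t.getD jv 0 = -1
    · have hstep : edgeStep d (t, b) uv = (t.set jv d, true) := by
        simp only [edgeStep, e1, e2]
        rw [if_pos hc1, setD_bridge d (by rw [hlen]; exact hjv)]
      have htavjv : tav.getD jv 0 = -1 := by
        rcases compat jv hjvlt with h | ⟨h1, _⟩
        · rw [← h]; exact hc1.2
        · exact h1
      have htavju : tav.getD ju 0 = d - 6 := (hstable ju hjult).mp hc1.1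
      have hlen' : (t.set jv d).length = N := by simpa using hlen
      have compat' : ∀ k, k < N → (t.set jv d).getD k 0 = tav.getD k 0 ∨
          (tav.getD k 0 = -1 ∧ (t.set jv d).getD k 0 = d) := by
        intro k hk
        by_cases hkjv : k = jv
        · subst hkjv
          exact Or.inr ⟨htavjv, getD_set_self (by omega) d⟩
        · rw [getD_set_ne (fun h => hkjv h.symm) d]
          exact compat k hk
      have hIH := ih (t.set jv d) true hlen' hE' compat'
      have hhit : Marks (uv :: es) N tav d jv :=
        (Marks_cons uv es N tav d jv).mpr (Or.inl ⟨⟨ju, hju, htavju⟩, hjv⟩)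
      rw [List.foldl_cons, hstep]
      refine ⟨hIH.1, ?_, ?_⟩
      · intro k hkN
        by_cases hkjv : k = jv
        · subst hkjv
          have hres : (es.foldl (edgeStep d) (t.set k d, true)).1.getD k 0 = d := by
            rw [(hIH.2.1 k hkN).2 ?_, getD_set_self (by omega) d]
            rintro ⟨_, habs⟩
            rw [getD_set_self (by omega) d] at habs
            omega
          exact ⟨fun _ => hres, fun hn => absurd ⟨hhit, hc1.2⟩ hn⟩
        · have hset : (t.set jv d).getD k 0 = t.getD k 0 := getD_set_ne (fun h => hkjv h.symm) d
          have hMk : Marks (uv :: es) N tav d k ↔ Marks es N tav d k := by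
            rw [Marks_cons]
            constructor
            · rintro (⟨_, hk2⟩ | ⟨⟨j, hj, hjval⟩, _⟩ | h)
              · exact absurd (by rw [hjv] at hk2; injection hk2 with h; omega) hkjv
              · rw [hjv] at hj
                injection hj with h
                subst h
                omega
              · exact h
            · exact fun h => Or.inr (Or.inr h)
          constructor
          · rintro ⟨hm, hk1⟩
            rw [(hIH.2.1 k hkN).1 ⟨hMk.mp hm, by rw [hset]; exact hk1⟩]
          · intro hn
            rw [(hIH.2.1 k hkN).2 ?_, hset]
            rintro ⟨hm, hk1⟩
            rw [hset] at hk1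
            exact hn ⟨hMk.mpr hm, hk1⟩
      · constructor
        · intro _
          exact Or.inr ⟨jv, hjvlt, hhit, hc1.2⟩
        · intro _
          exact hIH.2.2.mpr (Or.inl rfl)
    · by_cases hc2 : t.getD jv 0 = d - 6 ∧ t.getD ju 0 = -1
      · have hstep : edgeStep d (t, b) uv = (t.set ju d, true) := by
          simp only [edgeStep, e1, e2]
          rw [if_neg hc1, if_pos hc2, setD_bridge d (by rw [hlen]; exact hju)]
        have htavju : tav.getD ju 0 = -1 := by
          rcases compat ju hjult with h | ⟨h1, _⟩
          · rw [← h]; exact hc2.2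
          · exact h1
        have htavjv : tav.getD jv 0 = d - 6 := (hstable jv hjvlt).mp hc2.1
        have hlen' : (t.set ju d).length = N := by simpa using hlen
        have compat' : ∀ k, k < N → (t.set ju d).getD k 0 = tav.getD k 0 ∨
            (tav.getD k 0 = -1 ∧ (t.set ju d).getD k 0 = d) := by
          intro k hk
          by_cases hkju : k = ju
          · subst hkju
            exact Or.inr ⟨htavju, getD_set_self (by omega) d⟩
          · rw [getD_set_ne (fun h => hkju h.symm) d]
            exact compat k hk
        have hIH := ih (t.set ju d) true hlen' hE' compat'
        have hhit : Marks (uv :: es) N tav d ju :=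
          (Marks_cons uv es N tav d ju).mpr (Or.inr (Or.inl ⟨⟨jv, hjv, htavjv⟩, hju⟩))
        rw [List.foldl_cons, hstep]
        refine ⟨hIH.1, ?_, ?_⟩
        · intro k hkN
          by_cases hkju : k = ju
          · subst hkju
            have hres : (es.foldl (edgeStep d) (t.set k d, true)).1.getD k 0 = d := by
              rw [(hIH.2.1 k hkN).2 ?_, getD_set_self (by omega) d]
              rintro ⟨_, habs⟩
              rw [getD_set_self (by omega) d] at habs
              omega
            exact ⟨fun _ => hres, fun hn => absurd ⟨hhit, hc2.2⟩ hn⟩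
          · have hset : (t.set ju d).getD k 0 = t.getD k 0 := getD_set_ne (fun h => hkju h.symm) d
            have hMk : Marks (uv :: es) N tav d k ↔ Marks es N tav d k := by
              rw [Marks_cons]
              constructor
              · rintro (⟨⟨j, hj, hjval⟩, _⟩ | ⟨_, hk2⟩ | h)
                · rw [hju] at hj
                  injection hj with h
                  subst h
                  omega
                · exact absurd (by rw [hju] at hk2; injection hk2 with h; omega) hkju
                · exact h
              · exact fun h => Or.inr (Or.inr h)
            constructor
            · rintro ⟨hm, hk1⟩
              rw [(hIH.2.1 k hkN).1 ⟨hMk.mp hm, by rw [hset]; exact hk1⟩]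
            · intro hn
              rw [(hIH.2.1 k hkN).2 ?_, hset]
              rintro ⟨hm, hk1⟩
              rw [hset] at hk1
              exact hn ⟨hMk.mpr hm, hk1⟩
        · constructor
          · intro _
            exact Or.inr ⟨ju, hjult, hhit, hc2.2⟩
          · intro _
            exact hIH.2.2.mpr (Or.inl rfl)
      · have hstep : edgeStep d (t, b) uv = (t, b) := by
          simp only [edgeStep, e1, e2]
          rw [if_neg hc1, if_neg hc2]
        have hIH := ih t b hlen hE' compat
        have hMk : ∀ k, k < N → t.getD k 0 = -1 →
            (Marks (uv :: es) N tav d k ↔ Marks es N tav d k) := by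
          intro k hkN hk1
          rw [Marks_cons]
          constructor
          · rintro (⟨⟨j, hj, hjval⟩, hk2⟩ | ⟨⟨j, hj, hjval⟩, hk2⟩ | h)
            · rw [hjv] at hk2
              injection hk2 with h2
              subst h2
              rw [hju] at hj
              injection hj with h3
              subst h3
              exact absurd ⟨(hstable ju hjult).mpr hjval, hk1⟩ hc1
            · rw [hju] at hk2
              injection hk2 with h2
              subst h2
              rw [hjv] at hj
              injection hj with h3
              subst h3
              exact absurd ⟨(hstable jv hjvlt).mpr hjval, hk1⟩ hc2
            · exact h
          · exact fun h => Or.inr (Or.inr h)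
        rw [List.foldl_cons, hstep]
        refine ⟨hIH.1, ?_, ?_⟩
        · intro k hkN
          constructor
          · rintro ⟨hm, hk1⟩
            exact (hIH.2.1 k hkN).1 ⟨(hMk k hkN hk1).mp hm, hk1⟩
          · intro hn
            refine (hIH.2.1 k hkN).2 ?_
            rintro ⟨hm, hk1⟩
            exact hn ⟨(hMk k hkN hk1).mpr hm, hk1⟩
        · rw [hIH.2.2]
          constructor
          · rintro (h | ⟨k, hkN, hm, hk1⟩)
            · exact Or.inl h
            · exact Or.inr ⟨k, hkN, (hMk k hkN hk1).mpr hm, hk1⟩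
          · rintro (h | ⟨k, hkN, hm, hk1⟩)
            · exact Or.inl h
            · exact Or.inr ⟨k, hkN, (hMk k hkN hk1).mp hm, hk1⟩

-- adjacency characterization of A's buildAdj
theorem adj_fold_length (es : List (Int × Int)) :
    ∀ sz : List (List Int),
      (es.foldl (fun sz uv => adjIns (adjIns sz uv.1 uv.2) uv.2 uv.1) sz).length = sz.length := by
  induction es with
  | nil => intro sz; rfl
  | cons uv es ih =>
    intro sz
    rw [List.foldl_cons, ih]
    simp [adjIns, PySem.List.length_pySetD]

theorem buildAdj_length (N : Nat) (elek : List (Int × Int)) : (buildAdj N elek).length = N := by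
  unfold buildAdj
  rw [adj_fold_length]
  exact List.length_replicate

theorem adjIns_mem {sz : List (List Int)} {u : Int} {ju : Nat} (v : Int)
    (hu : PySem.List.pyIdx? sz.length u = some ju) (k : Nat) (hk : k < sz.length) (w : Int) :
    w ∈ (adjIns sz u v).getD k [] ↔ w ∈ sz.getD k [] ∨ (k = ju ∧ w = v) := by
  have hju := pyIdx?_lt_of_some hu
  unfold adjIns
  rw [getD_bridge [] hu, setD_bridge _ hu]
  by_cases hkj : k = ju
  · subst hkj
    have hset : (sz.set k (sz.getD k [] ++ [v])).getD k [] = sz.getD k [] ++ [v] := by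
      rw [List.getD_eq_getElem _ _ (by simpa using hk)]
      simp
    rw [hset]
    simp [List.mem_append]
  · have hset : (sz.set ju (sz.getD ju [] ++ [v])).getD k [] = sz.getD k [] := by
      rw [List.getD_eq_getElem _ _ (by simpa using hk), List.getD_eq_getElem _ _ hk]
      rw [List.getElem_set_ne (by omega)]
    rw [hset]
    simp [hkj]

theorem adj_fold_mem (N : Nat) (es : List (Int × Int)) :
    ∀ (sz : List (List Int)), sz.length = N →
      (∀ uv ∈ es, (∃ j, PySem.List.pyIdx? N uv.1 = some j) ∧ (∃ j, PySem.List.pyIdx? N uv.2 = some j)) →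
      ∀ k, k < N → ∀ w,
      (w ∈ (es.foldl (fun sz uv => adjIns (adjIns sz uv.1 uv.2) uv.2 uv.1) sz).getD k [] ↔
        w ∈ sz.getD k [] ∨
          ∃ uv ∈ es, (PySem.List.pyIdx? N uv.1 = some k ∧ uv.2 = w) ∨
                     (PySem.List.pyIdx? N uv.2 = some k ∧ uv.1 = w)) := by
  induction es with
  | nil => intro sz _ _ k hk w; simp
  | cons uv es ih =>
    intro sz hlen hE k hk w
    obtain ⟨⟨ju, hju⟩, ⟨jv, hjv⟩⟩ := hE uv (by simp)
    have h1 : (adjIns sz uv.1 uv.2).length = sz.length := by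
      simp [adjIns, PySem.List.length_pySetD]
    have h2 : (adjIns (adjIns sz uv.1 uv.2) uv.2 uv.1).length = sz.length := by
      rw [adjIns, PySem.List.length_pySetD, h1]
    rw [List.foldl_cons,
      ih _ (by rw [h2, hlen]) (fun x hx => hE x (by simp [hx])) k hk w]
    have hm2 : w ∈ (adjIns (adjIns sz uv.1 uv.2) uv.2 uv.1).getD k [] ↔
        w ∈ (adjIns sz uv.1 uv.2).getD k [] ∨ (k = jv ∧ w = uv.1) := by
      apply adjIns_mem
      · rw [h1, hlen]; exact hjv
      · rw [h1, hlen]; exact hk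
    have hm1 : w ∈ (adjIns sz uv.1 uv.2).getD k [] ↔
        w ∈ sz.getD k [] ∨ (k = ju ∧ w = uv.2) := by
      apply adjIns_mem
      · rw [hlen]; exact hju
      · rw [hlen]; exact hk
    rw [hm2, hm1]
    simp only [List.mem_cons]
    constructor
    · rintro (((h | ⟨rfl, rfl⟩) | ⟨rfl, rfl⟩) | ⟨x, hx, hor⟩)
      · exact Or.inl h
      · exact Or.inr ⟨uv, Or.inl rfl, Or.inl ⟨hju, rfl⟩⟩
      · exact Or.inr ⟨uv, Or.inl rfl, Or.inr ⟨hjv, rfl⟩⟩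
      · exact Or.inr ⟨x, Or.inr hx, hor⟩
    · rintro (h | ⟨x, (rfl | hx), hor⟩)
      · exact Or.inl (Or.inl (Or.inl h))
      · rcases hor with ⟨hk1, rfl⟩ | ⟨hk2, rfl⟩
        · exact Or.inl (Or.inl (Or.inr ⟨by rw [hju] at hk1; injection hk1; omega, rfl⟩))
        · exact Or.inl (Or.inr ⟨by rw [hjv] at hk2; injection hk2; omega, rfl⟩)
      · exact Or.inr ⟨x, hx, hor⟩

theorem buildAdj_mem (N : Nat) (elek : List (Int × Int))
    (hE : ∀ uv ∈ elek, (∃ j, PySem.List.pyIdx? N uv.1 = some j) ∧ (∃ j, PySem.List.pyIdx? N uv.2 = some j)) :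
    ∀ k, k < N → ∀ w,
      (w ∈ (buildAdj N elek).getD k [] ↔
        ∃ uv ∈ elek, (PySem.List.pyIdx? N uv.1 = some k ∧ uv.2 = w) ∨
                     (PySem.List.pyIdx? N uv.2 = some k ∧ uv.1 = w)) := by
  intro k hk w
  unfold buildAdj
  rw [adj_fold_mem N elek _ (by simp) hE k hk w]
  simp

theorem relaxNbrs_spec (N : Nat) (d : Int) (hd : 6 ≤ d) (jraw : Int) (j0 : Nat)
    (hj0 : PySem.List.pyIdx? N jraw = some j0) :
    ∀ (nbrs : List Int) (t : List Int), t.length = N → t.getD j0 0 = d - 6 →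
      (∀ v ∈ nbrs, ∃ k, PySem.List.pyIdx? N v = some k) →
      (relaxNbrs jraw nbrs t).1.length = N ∧
      (∀ k, k < N →
        ((∃ v ∈ nbrs, PySem.List.pyIdx? N v = some k) ∧ t.getD k 0 = -1 →
          (relaxNbrs jraw nbrs t).1.getD k 0 = d) ∧
        (¬((∃ v ∈ nbrs, PySem.List.pyIdx? N v = some k) ∧ t.getD k 0 = -1) →
          (relaxNbrs jraw nbrs t).1.getD k 0 = t.getD k 0)) ∧
      (∀ v ∈ (relaxNbrs jraw nbrs t).2, v ∈ nbrs) ∧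
      (∀ k, (∃ v ∈ (relaxNbrs jraw nbrs t).2, PySem.List.pyIdx? N v = some k) ↔
        (∃ v ∈ nbrs, PySem.List.pyIdx? N v = some k) ∧ t.getD k 0 = -1) := by
  intro nbrs
  induction nbrs with
  | nil =>
    intro t hlen hj0v _
    simp only [relaxNbrs]
    refine ⟨hlen, ?_, ?_, ?_⟩
    · intro k _
      refine ⟨?_, fun _ => by trivial⟩
      rintro ⟨⟨v, hv, _⟩, _⟩
      simp at hv
    · intro v hv
      simp at hv
    · intro k
      constructor
      · rintro ⟨v, hv, _⟩
        simp at hv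
      · rintro ⟨⟨v, hv, _⟩, _⟩
        simp at hv
  | cons v vs ih =>
    intro t hlen hj0v hres
    obtain ⟨kv, hkv⟩ := hres v (by simp)
    have hkvlt := pyIdx?_lt_of_some hkv
    have hbr : PySem.List.pyGetD t v 0 = t.getD kv 0 := getD_bridge 0 (by rw [hlen]; exact hkv)
    have hjb : PySem.List.pyGetD t jraw 0 = t.getD j0 0 := getD_bridge 0 (by rw [hlen]; exact hj0)
    by_cases hv : t.getD kv 0 = -1
    · have hcond : PySem.List.pyGetD t v 0 = -1 := by rw [hbr]; exact hv
      have hj0kv : j0 ≠ kv := by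
        intro h; rw [h] at hj0v; omega
      have ht'eq : PySem.List.pySetD t v (PySem.List.pyGetD t jraw 0 + 6) = t.set kv d := by
        rw [setD_bridge _ (by rw [hlen]; exact hkv), hjb, hj0v]
        congr 1; omega
      simp only [relaxNbrs, hcond, if_pos, ht'eq]
      have hlen' : (t.set kv d).length = N := by simpa using hlen
      have hself : (t.set kv d).getD kv 0 = d := getD_set_self (by omega) d
      have hne : ∀ k, k ≠ kv → (t.set kv d).getD k 0 = t.getD k 0 :=
        fun k hk => getD_set_ne (fun h => hk h.symm) d
      have hIH := ih (t.set kv d) hlen' (by rw [hne j0 hj0kv]; exact hj0v)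
        (fun w hw => hres w (by simp [hw]))
      refine ⟨hIH.1, ?_, ?_, ?_⟩
      · intro k hkN
        constructor
        · rintro ⟨⟨x, hx, hxk⟩, hk1⟩
          by_cases hkkv : k = kv
          · subst hkkv
            have := (hIH.2.1 k hkN).2
              (by rintro ⟨_, habs⟩; rw [hself] at habs; omega)
            rw [this, hself]
          · rcases List.mem_cons.mp hx with rfl | hx'
            · exact absurd (by rw [hkv] at hxk; injection hxk with h; omega) hkkv
            · exact (hIH.2.1 k hkN).1 ⟨⟨x, hx', hxk⟩, by rw [hne k hkkv]; exact hk1⟩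
        · intro hn
          by_cases hkkv : k = kv
          · subst hkkv
            exact absurd ⟨⟨v, by simp, hkv⟩, hv⟩ hn
          · have := (hIH.2.1 k hkN).2 (by
              rintro ⟨⟨x, hx, hxk⟩, hk1⟩
              exact hn ⟨⟨x, by simp [hx], hxk⟩, by rw [hne k hkkv] at hk1; exact hk1⟩)
            rw [this, hne k hkkv]
      · intro w hw
        rcases List.mem_cons.mp hw with rfl | hw'
        · simp
        · simp [hIH.2.2.1 w hw']
      · intro k
        by_cases hkkv : k = kv
        · subst hkkv
          constructor
          · intro _; exact ⟨⟨v, by simp, hkv⟩, hv⟩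
          · intro _; exact ⟨v, by simp, hkv⟩
        · constructor
          · rintro ⟨x, hx, hxk⟩
            rcases List.mem_cons.mp hx with rfl | hx'
            · exact absurd (by rw [hkv] at hxk; injection hxk with h; omega) hkkv
            · have := (hIH.2.2.2 k).mp ⟨x, hx', hxk⟩
              exact ⟨⟨x, by simp [hIH.2.2.1 x hx'], hxk⟩, by rw [hne k hkkv] at this; exact this.2⟩
          · rintro ⟨⟨x, hx, hxk⟩, hk1⟩
            rcases List.mem_cons.mp hx with rfl | hx'
            · exact absurd (by rw [hkv] at hxk; injection hxk with h; omega) hkkv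
            · obtain ⟨y, hy, hyk⟩ := (hIH.2.2.2 k).mpr
                ⟨⟨x, hx', hxk⟩, by rw [hne k hkkv]; exact hk1⟩
              exact ⟨y, by simp [hy], hyk⟩
    · have hcond : ¬ PySem.List.pyGetD t v 0 = -1 := by rw [hbr]; exact hv
      simp only [relaxNbrs, hcond, if_false]
      have hIH := ih t hlen hj0v (fun w hw => hres w (by simp [hw]))
      refine ⟨hIH.1, ?_, ?_, ?_⟩
      · intro k hkN
        constructor
        · rintro ⟨⟨x, hx, hxk⟩, hk1⟩
          rcases List.mem_cons.mp hx with rfl | hx'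
          · have : k = kv := by rw [hkv] at hxk; injection hxk with h; omega
            subst this; exact absurd hk1 hv
          · exact (hIH.2.1 k hkN).1 ⟨⟨x, hx', hxk⟩, hk1⟩
        · intro hn
          exact (hIH.2.1 k hkN).2 (by
            rintro ⟨⟨x, hx, hxk⟩, hk1⟩
            exact hn ⟨⟨x, by simp [hx], hxk⟩, hk1⟩)
      · intro w hw; simp [hIH.2.2.1 w hw]
      · intro k
        rw [hIH.2.2.2 k]
        constructor
        · rintro ⟨⟨x, hx, hxk⟩, hk1⟩
          exact ⟨⟨x, by simp [hx], hxk⟩, hk1⟩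
        · rintro ⟨⟨x, hx, hxk⟩, hk1⟩
          rcases List.mem_cons.mp hx with rfl | hx'
          · have : k = kv := by rw [hkv] at hxk; injection hxk with h; omega
            subst this; exact absurd hk1 hv
          · exact ⟨⟨x, hx', hxk⟩, hk1⟩

-- the hit condition of one whole layer
def LHit (szom : List (List Int)) (N : Nat) (F : List Int) (k : Nat) : Prop :=
  ∃ x ∈ F, ∃ j, PySem.List.pyIdx? N x = some j ∧
    ∃ w ∈ szom.getD j [], PySem.List.pyIdx? N w = some k

theorem relaxLayer_spec (elek : List (Int × Int)) (N : Nat) (d : Int) (hd : 6 ≤ d)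
    (szom : List (List Int)) (hlenS : szom.length = N)
    (hchar : ∀ k, k < N → ∀ w,
      (w ∈ szom.getD k [] ↔
        ∃ uv ∈ elek, (PySem.List.pyIdx? N uv.1 = some k ∧ uv.2 = w) ∨
                     (PySem.List.pyIdx? N uv.2 = some k ∧ uv.1 = w)))
    (hE : ∀ uv ∈ elek, (∃ j, PySem.List.pyIdx? N uv.1 = some j) ∧ (∃ j, PySem.List.pyIdx? N uv.2 = some j)) :
    ∀ (F : List Int) (t : List Int), t.length = N →
      (∀ x ∈ F, ∃ j, PySem.List.pyIdx? N x = some j ∧ t.getD j 0 = d - 6) →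
      (relaxLayer szom F t).1.length = N ∧
      (∀ k, k < N →
        (LHit szom N F k ∧ t.getD k 0 = -1 → (relaxLayer szom F t).1.getD k 0 = d) ∧
        (¬(LHit szom N F k ∧ t.getD k 0 = -1) → (relaxLayer szom F t).1.getD k 0 = t.getD k 0)) ∧
      (∀ v ∈ (relaxLayer szom F t).2, ∃ k, PySem.List.pyIdx? N v = some k) ∧
      (∀ k, (∃ v ∈ (relaxLayer szom F t).2, PySem.List.pyIdx? N v = some k) ↔
        LHit szom N F k ∧ t.getD k 0 = -1) := by
  intro F
  induction F with
  | nil =>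
    intro t hlen _
    simp only [relaxLayer]
    refine ⟨hlen, ?_, ?_, ?_⟩
    · intro k _
      refine ⟨?_, fun _ => by trivial⟩
      rintro ⟨⟨x, hx, _⟩, _⟩
      simp at hx
    · intro v hv
      simp at hv
    · intro k
      constructor
      · rintro ⟨v, hv, _⟩
        simp at hv
      · rintro ⟨⟨x, hx, _⟩, _⟩
        simp at hx
  | cons j rest ih =>
    intro t hlen hF
    obtain ⟨j0, hj0, hj0v⟩ := hF j (by simp)
    have hj0lt := pyIdx?_lt_of_some hj0
    have hnb : PySem.List.pyGetD szom j [] = szom.getD j0 [] :=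
      getD_bridge [] (by rw [hlenS]; exact hj0)
    have hresnb : ∀ w ∈ szom.getD j0 [], ∃ k, PySem.List.pyIdx? N w = some k := by
      intro w hw
      rcases (hchar j0 hj0lt w).mp hw with ⟨uv, huv, h | h⟩
      · rcases (hE uv huv).2 with ⟨k, hk⟩; exact ⟨k, h.2 ▸ hk⟩
      · rcases (hE uv huv).1 with ⟨k, hk⟩; exact ⟨k, h.2 ▸ hk⟩
    have hspec := relaxNbrs_spec N d hd j j0 hj0 (szom.getD j0 []) t hlen hj0v hresnb
    have hnode : relaxNode szom t j = relaxNbrs j (szom.getD j0 []) t := by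
      rw [relaxNode, hnb]
    -- abbreviations
    have hsplit : ∀ k, LHit szom N (j :: rest) k ↔
        ((∃ w ∈ szom.getD j0 [], PySem.List.pyIdx? N w = some k) ∨ LHit szom N rest k) := by
      intro k
      constructor
      · rintro ⟨x, hx, jx, hjx, w, hw, hwk⟩
        rcases List.mem_cons.mp hx with rfl | hx'
        · rw [hj0] at hjx
          injection hjx with h
          subst h
          exact Or.inl ⟨w, hw, hwk⟩
        · exact Or.inr ⟨x, hx', jx, hjx, w, hw, hwk⟩
      · rintro (⟨w, hw, hwk⟩ | ⟨x, hx', jx, hjx, w, hw, hwk⟩)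
        · exact ⟨j, by simp, j0, hj0, w, hw, hwk⟩
        · exact ⟨x, by simp [hx'], jx, hjx, w, hw, hwk⟩
    have hdne : d ≠ -1 := by omega
    have hF' : ∀ x ∈ rest, ∃ jx, PySem.List.pyIdx? N x = some jx ∧
        (relaxNbrs j (szom.getD j0 []) t).1.getD jx 0 = d - 6 := by
      intro x hx
      obtain ⟨jx, hjx, hjxv⟩ := hF x (by simp [hx])
      refine ⟨jx, hjx, ?_⟩
      rw [(hspec.2.1 jx (pyIdx?_lt_of_some hjx)).2 (by rintro ⟨_, habs⟩; omega)]
      exact hjxv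
    have hIH := ih (relaxNbrs j (szom.getD j0 []) t).1 hspec.1 hF'
    simp only [relaxLayer, hnode]
    refine ⟨hIH.1, ?_, ?_, ?_⟩
    · intro k hkN
      constructor
      · rintro ⟨hhit, hk1⟩
        rcases (hsplit k).mp hhit with hnb' | hrest
        · have ht1 : (relaxNbrs j (szom.getD j0 []) t).1.getD k 0 = d :=
            (hspec.2.1 k hkN).1 ⟨hnb', hk1⟩
          rw [(hIH.2.1 k hkN).2 (by rintro ⟨_, habs⟩; rw [ht1] at habs; omega), ht1]
        · by_cases hnb2 : ∃ w ∈ szom.getD j0 [], PySem.List.pyIdx? N w = some k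
          · have ht1 : (relaxNbrs j (szom.getD j0 []) t).1.getD k 0 = d :=
              (hspec.2.1 k hkN).1 ⟨hnb2, hk1⟩
            rw [(hIH.2.1 k hkN).2 (by rintro ⟨_, habs⟩; rw [ht1] at habs; omega), ht1]
          · have ht1 : (relaxNbrs j (szom.getD j0 []) t).1.getD k 0 = t.getD k 0 :=
              (hspec.2.1 k hkN).2 (by rintro ⟨ha, _⟩; exact hnb2 ha)
            exact (hIH.2.1 k hkN).1 ⟨hrest, by rw [ht1]; exact hk1⟩
      · intro hn
        have hnbn : ¬((∃ w ∈ szom.getD j0 [], PySem.List.pyIdx? N w = some k) ∧ t.getD k 0 = -1) := by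
          rintro ⟨ha, hb⟩
          exact hn ⟨(hsplit k).mpr (Or.inl ha), hb⟩
        have ht1 : (relaxNbrs j (szom.getD j0 []) t).1.getD k 0 = t.getD k 0 :=
          (hspec.2.1 k hkN).2 hnbn
        have hrn : ¬(LHit szom N rest k ∧ (relaxNbrs j (szom.getD j0 []) t).1.getD k 0 = -1) := by
          rintro ⟨ha, hb⟩
          rw [ht1] at hb
          exact hn ⟨(hsplit k).mpr (Or.inr ha), hb⟩
        rw [(hIH.2.1 k hkN).2 hrn, ht1]
    · intro v hv
      rcases List.mem_append.mp hv with hv1 | hv2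
      · exact hresnb v (hspec.2.2.1 v hv1)
      · exact hIH.2.2.1 v hv2
    · intro k
      by_cases hkN : k < N
      · constructor
        · rintro ⟨v, hv, hvk⟩
          rcases List.mem_append.mp hv with hv1 | hv2
          · obtain ⟨ha, hb⟩ := (hspec.2.2.2 k).mp ⟨v, hv1, hvk⟩
            exact ⟨(hsplit k).mpr (Or.inl ha), hb⟩
          · obtain ⟨ha, hb⟩ := (hIH.2.2.2 k).mp ⟨v, hv2, hvk⟩
            have hb' : t.getD k 0 = -1 := by
              by_cases hc : (∃ w ∈ szom.getD j0 [], PySem.List.pyIdx? N w = some k) ∧ t.getD k 0 = -1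
              · exact hc.2
              · rwa [(hspec.2.1 k hkN).2 hc] at hb
            exact ⟨(hsplit k).mpr (Or.inr ha), hb'⟩
        · rintro ⟨hhit, hk1⟩
          rcases (hsplit k).mp hhit with hnb' | hrest
          · obtain ⟨v, hv, hvk⟩ := (hspec.2.2.2 k).mpr ⟨hnb', hk1⟩
            exact ⟨v, List.mem_append.mpr (Or.inl hv), hvk⟩
          · by_cases hnb2 : ∃ w ∈ szom.getD j0 [], PySem.List.pyIdx? N w = some k
            · obtain ⟨v, hv, hvk⟩ := (hspec.2.2.2 k).mpr ⟨hnb2, hk1⟩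
              exact ⟨v, List.mem_append.mpr (Or.inl hv), hvk⟩
            · have ht1 : (relaxNbrs j (szom.getD j0 []) t).1.getD k 0 = t.getD k 0 :=
                (hspec.2.1 k hkN).2 (by rintro ⟨ha, _⟩; exact hnb2 ha)
              obtain ⟨v, hv, hvk⟩ := (hIH.2.2.2 k).mpr ⟨hrest, by rw [ht1]; exact hk1⟩
              exact ⟨v, List.mem_append.mpr (Or.inr hv), hvk⟩
      · constructor
        · rintro ⟨v, _, hvk⟩
          exact absurd (pyIdx?_lt_of_some hvk) hkN
        · rintro ⟨hhit, _⟩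
          rcases (hsplit k).mp hhit with ⟨w, _, hwk⟩ | ⟨x, _, jx, _, w, _, hwk⟩ <;>
            exact absurd (pyIdx?_lt_of_some hwk) hkN

theorem ext_getD {N : Nat} (a b : List Int) (ha : a.length = N) (hb : b.length = N)
    (h : ∀ k, k < N → a.getD k 0 = b.getD k 0) : a = b := by
  apply List.ext_getElem (by omega)
  intro k h1 h2
  have := h k (by omega)
  rwa [List.getD_eq_getElem a 0 h1, List.getD_eq_getElem b 0 h2] at this

theorem InvT_of_bounds {N : Nat} {d0 : Int} {t : List Int} (hlen : t.length = N)
    (h : ∀ k, k < N → t.getD k 0 = -1 ∨ (0 ≤ t.getD k 0 ∧ t.getD k 0 ≤ d0)) : InvT t := by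
  intro x hx
  obtain ⟨k, hk, rfl⟩ := List.mem_iff_getElem.mp hx
  have h2 := h k (by omega)
  rw [List.getD_eq_getElem t 0 hk] at h2
  rcases h2 with h2 | h2
  · exact Or.inl h2
  · exact Or.inr h2.1

-- the layer-at-a-time loop computes the same distances as B's sweep loop
theorem layers_eq_rounds (elek : List (Int × Int)) (N : Nat)
    (szom : List (List Int)) (hlenS : szom.length = N)
    (hchar : ∀ k, k < N → ∀ w,
      (w ∈ szom.getD k [] ↔
        ∃ uv ∈ elek, (PySem.List.pyIdx? N uv.1 = some k ∧ uv.2 = w) ∨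
                     (PySem.List.pyIdx? N uv.2 = some k ∧ uv.1 = w)))
    (hE : ∀ uv ∈ elek, (∃ j, PySem.List.pyIdx? N uv.1 = some j) ∧ (∃ j, PySem.List.pyIdx? N uv.2 = some j)) :
    ∀ (fR fL : Nat) (d0 : Int) (F t : List Int),
      t.length = N → 0 ≤ d0 →
      (∀ x ∈ F, ∃ j, PySem.List.pyIdx? N x = some j) →
      (∀ k, k < N → (t.getD k 0 = d0 ↔ ∃ x ∈ F, PySem.List.pyIdx? N x = some k)) →
      (∀ k, k < N → t.getD k 0 = -1 ∨ (0 ≤ t.getD k 0 ∧ t.getD k 0 ≤ d0)) →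
      F.length + t.count (-1) ≤ fL →
      t.count (-1) + 1 ≤ fR →
      bfsLayers szom fL F t = bfsRounds elek fR d0 t := by
  intro fR
  induction fR with
  | zero =>
    intro fL d0 F t _ _ _ _ _ _ hfR
    omega
  | succ fR ih =>
    intro fL d0 F t hlen hd0 hFres hI3 hI4 hfL hfR
    have hd : 6 ≤ d0 + 6 := by omega
    have hpass := edgePass_go N t (d0 + 6) hd elek t false hlen hE (fun k _ => Or.inl rfl)
    cases F with
    | nil =>
      have hnoM : ∀ k, k < N → ¬(Marks elek N t (d0 + 6) k ∧ t.getD k 0 = -1) := by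
        rintro k hk ⟨⟨uv, huv, ⟨⟨j, hj, hjval⟩, _⟩ | ⟨⟨j, hj, hjval⟩, _⟩⟩, _⟩ <;>
        · have hjlt := pyIdx?_lt_of_some hj
          have hjd : t.getD j 0 = d0 := by omega
          obtain ⟨y, hy, _⟩ := (hI3 j hjlt).mp hjd
          simp at hy
      have hb : (elek.foldl (edgeStep (d0 + 6)) (t, false)).2 = false := by
        cases hb2 : (elek.foldl (edgeStep (d0 + 6)) (t, false)).2
        · rfl
        · exfalso
          rcases hpass.2.2.mp hb2 with h | ⟨k, hk, hm, h1⟩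
          · simp at h
          · exact hnoM k hk ⟨hm, h1⟩
      have hteq : (elek.foldl (edgeStep (d0 + 6)) (t, false)).1 = t :=
        ext_getD _ _ hpass.1 hlen (fun k hk => (hpass.2.1 k hk).2 (hnoM k hk))
      have hR : bfsRounds elek (fR + 1) d0 t = t := by
        simp only [bfsRounds, edgePass]
        rw [hb]
        simp [hteq]
      rw [hR]
      cases fL <;> simp [bfsLayers]
    | cons x F' =>
      obtain ⟨fL', rfl⟩ : ∃ fL', fL = fL' + 1 := by
        cases fL with
        | zero => exfalso; simp only [List.length_cons] at hfL; omega
        | succ fL' => exact ⟨fL', rfl⟩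
      have hFval : ∀ y ∈ x :: F', ∃ j, PySem.List.pyIdx? N y = some j ∧ t.getD j 0 = (d0 + 6) - 6 := by
        intro y hy
        obtain ⟨j, hj⟩ := hFres y hy
        refine ⟨j, hj, ?_⟩
        have := (hI3 j (pyIdx?_lt_of_some hj)).mpr ⟨y, hy, hj⟩
        omega
      have hlay := relaxLayer_spec elek N (d0 + 6) hd szom hlenS hchar hE (x :: F') t hlen hFval
      have hMH : ∀ k, k < N → (Marks elek N t (d0 + 6) k ↔ LHit szom N (x :: F') k) := by
        intro k hk
        constructor
        · rintro ⟨uv, huv, ⟨⟨j, hj, hjval⟩, hk2⟩ | ⟨⟨j, hj, hjval⟩, hk2⟩⟩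
          · have hjlt := pyIdx?_lt_of_some hj
            have hjd : t.getD j 0 = d0 := by omega
            obtain ⟨y, hy, hyj⟩ := (hI3 j hjlt).mp hjd
            exact ⟨y, hy, j, hyj, uv.2, (hchar j hjlt uv.2).mpr ⟨uv, huv, Or.inl ⟨hj, rfl⟩⟩, hk2⟩
          · have hjlt := pyIdx?_lt_of_some hj
            have hjd : t.getD j 0 = d0 := by omega
            obtain ⟨y, hy, hyj⟩ := (hI3 j hjlt).mp hjd
            exact ⟨y, hy, j, hyj, uv.1, (hchar j hjlt uv.1).mpr ⟨uv, huv, Or.inr ⟨hj, rfl⟩⟩, hk2⟩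
        · rintro ⟨y, hy, j, hyj, w, hw, hwk⟩
          have hjlt := pyIdx?_lt_of_some hyj
          have hjd : t.getD j 0 = d0 := (hI3 j hjlt).mpr ⟨y, hy, hyj⟩
          rcases (hchar j hjlt w).mp hw with ⟨uv, huv, ⟨h1, h2⟩ | ⟨h1, h2⟩⟩
          · exact ⟨uv, huv, Or.inl ⟨⟨j, h1, by omega⟩, h2 ▸ hwk⟩⟩
          · exact ⟨uv, huv, Or.inr ⟨⟨j, h1, by omega⟩, h2 ▸ hwk⟩⟩
      have hpass1 : (elek.foldl (edgeStep (d0 + 6)) (t, false)).1 = (relaxLayer szom (x :: F') t).1 := by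
        apply ext_getD _ _ hpass.1 hlay.1
        intro k hk
        by_cases hcond : Marks elek N t (d0 + 6) k ∧ t.getD k 0 = -1
        · rw [(hpass.2.1 k hk).1 hcond, (hlay.2.1 k hk).1 ⟨(hMH k hk).mp hcond.1, hcond.2⟩]
        · rw [(hpass.2.1 k hk).2 hcond,
            (hlay.2.1 k hk).2 (fun hc => hcond ⟨(hMH k hk).mpr hc.1, hc.2⟩)]
      cases hnf : (relaxLayer szom (x :: F') t).2 with
      | nil =>
        have hnoM : ∀ k, k < N → ¬(Marks elek N t (d0 + 6) k ∧ t.getD k 0 = -1) := by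
          rintro k hk ⟨hm, h1⟩
          obtain ⟨v, hv, _⟩ := (hlay.2.2.2 k).mpr ⟨(hMH k hk).mp hm, h1⟩
          rw [hnf] at hv
          simp at hv
        have hb : (elek.foldl (edgeStep (d0 + 6)) (t, false)).2 = false := by
          cases hb2 : (elek.foldl (edgeStep (d0 + 6)) (t, false)).2
          · rfl
          · exfalso
            rcases hpass.2.2.mp hb2 with h | ⟨k, hk, hm, h1⟩
            · simp at h
            · exact hnoM k hk ⟨hm, h1⟩
        have hL : bfsLayers szom (fL' + 1) (x :: F') t = (relaxLayer szom (x :: F') t).1 := by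
          simp only [bfsLayers]
          rw [hnf]
          cases fL' <;> simp [bfsLayers]
        have hR : bfsRounds elek (fR + 1) d0 t = (relaxLayer szom (x :: F') t).1 := by
          simp only [bfsRounds, edgePass]
          rw [hb]
          simp [hpass1]
        rw [hL, hR]
      | cons y ys =>
        have hymem : y ∈ (relaxLayer szom (x :: F') t).2 := by rw [hnf]; simp
        have hb : (elek.foldl (edgeStep (d0 + 6)) (t, false)).2 = true := by
          obtain ⟨k, hk⟩ := hlay.2.2.1 y hymem
          have hch := (hlay.2.2.2 k).mp ⟨y, hymem, hk⟩
          exact hpass.2.2.mpr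
            (Or.inr ⟨k, pyIdx?_lt_of_some hk, (hMH k (pyIdx?_lt_of_some hk)).mpr hch.1, hch.2⟩)
        have hInvT : InvT t := InvT_of_bounds hlen hI4
        have hcnt := (relaxLayer_invariant szom (x :: F') t hInvT).2
        have hL : bfsLayers szom (fL' + 1) (x :: F') t =
            bfsLayers szom fL' (relaxLayer szom (x :: F') t).2 (relaxLayer szom (x :: F') t).1 := by
          simp only [bfsLayers]
        have hR : bfsRounds elek (fR + 1) d0 t =
            bfsRounds elek fR (d0 + 6) (relaxLayer szom (x :: F') t).1 := by
          simp only [bfsRounds, edgePass]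
          rw [hb]
          simp [hpass1]
        rw [hL, hR]
        apply ih fL' (d0 + 6) _ _ hlay.1 (by omega) hlay.2.2.1
        · intro k hk
          constructor
          · intro hval
            by_cases hcond : LHit szom N (x :: F') k ∧ t.getD k 0 = -1
            · exact (hlay.2.2.2 k).mpr hcond
            · exfalso
              rw [(hlay.2.1 k hk).2 hcond] at hval
              rcases hI4 k hk with h | h <;> omega
          · intro hex
            have hch := (hlay.2.2.2 k).mp hex
            exact (hlay.2.1 k hk).1 hch
        · intro k hk
          by_cases hcond : LHit szom N (x :: F') k ∧ t.getD k 0 = -1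
          · rw [(hlay.2.1 k hk).1 hcond]
            omega
          · rw [(hlay.2.1 k hk).2 hcond]
            rcases hI4 k hk with h | h
            · exact Or.inl h
            · exact Or.inr ⟨h.1, by omega⟩
        · have : (relaxLayer szom (x :: F') t).2.length ≥ 1 := by rw [hnf]; simp
          simp only [List.length_cons] at hfL
          omega
        · have : (relaxLayer szom (x :: F') t).2.length ≥ 1 := by rw [hnf]; simp
          omega

theorem getD_replicate {N k : Nat} (hk : k < N) :
    (List.replicate N (-1 : Int)).getD k 0 = -1 := by
  rw [List.getD_eq_getElem _ _ (by simpa using hk)]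
  simp

-- ===== VERDICT (by name: the statement is the Claim_ definition above) =====
theorem bfs_spec : Claim_equal_bfs := by
  intro n m elek s _ hPre
  unfold Spec_bfs
  obtain ⟨hEb, hs1, hs2⟩ := hPre
  have hE : ∀ uv ∈ elek, (∃ j, PySem.List.pyIdx? (n + 1).toNat uv.1 = some j) ∧
      (∃ j, PySem.List.pyIdx? (n + 1).toNat uv.2 = some j) := by
    intro uv huv
    obtain ⟨⟨a1, a2⟩, b1, b2⟩ := hEb uv huv
    exact ⟨resolve_of_bounds a1 a2, resolve_of_bounds b1 b2⟩
  obtain ⟨js, hjs⟩ := resolve_of_bounds hs1 hs2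
  have hjslt := pyIdx?_lt_of_some hjs
  simp only [bfs, bfs_alt]
  have hlen0 : (PySem.List.pySetD (List.replicate (n + 1).toNat (-1 : Int)) s 0).length
      = (n + 1).toNat := by
    rw [PySem.List.length_pySetD, List.length_replicate]
  have htav0 : PySem.List.pySetD (List.replicate (n + 1).toNat (-1 : Int)) s 0
      = (List.replicate (n + 1).toNat (-1 : Int)).set js 0 :=
    setD_bridge 0 (by rw [List.length_replicate]; exact hjs)
  have hInv := InvT_init (n + 1).toNat s
  have hcount : (PySem.List.pySetD (List.replicate (n + 1).toNat (-1 : Int)) s 0).count (-1)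
      ≤ (n + 1).toNat := le_trans List.count_le_length (le_of_eq hlen0)
  rw [bfsQueue_eq_bfsLayers (buildAdj (n + 1).toNat elek) ((n + 1).toNat + 1)
      [s] _ ((n + 1).toNat + 1) hInv
      (by simp only [List.length_cons, List.length_nil]; omega)
      (by simp only [List.length_cons, List.length_nil]; omega)]
  rw [layers_eq_rounds elek (n + 1).toNat (buildAdj (n + 1).toNat elek)
      (buildAdj_length _ _) (buildAdj_mem _ _ hE) hE
      ((n + 1).toNat + 1) ((n + 1).toNat + 1) 0 [s] _ hlen0 le_rfl
      (by
        intro x hx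
        simp only [List.mem_singleton] at hx
        subst hx
        exact ⟨js, hjs⟩)
      (by
        intro k hk
        rw [htav0]
        constructor
        · intro hval
          by_cases hkjs : k = js
          · exact ⟨s, by simp, by rw [hkjs]; exact hjs⟩
          · exfalso
            rw [getD_set_ne (fun h => hkjs h.symm) 0, getD_replicate hk] at hval
            omega
        · rintro ⟨x, hx, hxk⟩
          simp only [List.mem_singleton] at hx
          subst hx
          rw [hjs] at hxk
          injection hxk with h
          subst h
          exact getD_set_self (by simpa using hjslt) 0)
      (by
        intro k hk
        rw [htav0]
        by_cases hkjs : k = js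
        · subst hkjs
          rw [getD_set_self (by simpa using hjslt) 0]
          exact Or.inr ⟨le_rfl, le_rfl⟩
        · rw [getD_set_ne (fun h => hkjs h.symm) 0, getD_replicate hk]
          exact Or.inl rfl)
      (by simp only [List.length_cons, List.length_nil]; omega)
      (by omega)]
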